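-- pv_equiv track=rewrite | github.com/wherby/code | algorithm/bitManipulation/bit技巧/bitIncrease/基础处理.py | maximumAND
-- ===== SOURCE A (Python) =====
-- from typing import List, Tuple, Optional
-- from heapq import heapify,heappop,heappush
--
-- def maximumAND(nums: List[int], k: int, m: int) -> int:
--     ret = []
--     fd = False
--     for l in range(32,-1,-1):
--         st = []
--         msk = 1<<l
--         tm = list(ret) + [msk]
--         for i,a in enumerate(nums):
--             cst = 0
--             a1= a
--             for t1 in tm:
--                 a1 = a1%(t1*2)
--                 if a1<t1:
--                     cst += t1 - a1%t1
--                     a1 = 0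
--                 else:
--                     a1 = a1 %t1
--             heappush(st,(cst,i))
--         acc = 0
--         cand =[]
--
--         for _ in range(m):
--             cost,idx = heappop(st)
--             cand.append([cost,idx])
--             acc +=cost
--         if acc<=k:
--             ret.append(msk)
--
--     return sum(ret)
-- ===== SOURCE B (Python) =====
-- from heapq import nsmallest
-- def maximumAND(nums, k, m):
--     total = 0
--     state = [(0, a) for a in nums]
--     for l in range(32, -1, -1):
--         msk = 1 << l
--         nxt = []
--         for c, a in state:
--             r = a % (msk << 1)
--             nxt.append((c + msk - r, 0) if r < msk else (c, r - msk))
--         if sum(nsmallest(m, [c for c, _ in nxt])) <= k: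
--             total += msk
--             state = nxt
--     return total
-- ===== Notes on version B (the rewrite author's own statement) =====
-- stated objective: faster
-- what changed: B keeps an incremental (cost, residual) state per number across bits instead of recomputing each number's cost over the whole accepted-mask list every bit, and replaces the hand-rolled heap build + m pops by heapq.nsmallest on the plain per-bit cost list.
import Mathlib
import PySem

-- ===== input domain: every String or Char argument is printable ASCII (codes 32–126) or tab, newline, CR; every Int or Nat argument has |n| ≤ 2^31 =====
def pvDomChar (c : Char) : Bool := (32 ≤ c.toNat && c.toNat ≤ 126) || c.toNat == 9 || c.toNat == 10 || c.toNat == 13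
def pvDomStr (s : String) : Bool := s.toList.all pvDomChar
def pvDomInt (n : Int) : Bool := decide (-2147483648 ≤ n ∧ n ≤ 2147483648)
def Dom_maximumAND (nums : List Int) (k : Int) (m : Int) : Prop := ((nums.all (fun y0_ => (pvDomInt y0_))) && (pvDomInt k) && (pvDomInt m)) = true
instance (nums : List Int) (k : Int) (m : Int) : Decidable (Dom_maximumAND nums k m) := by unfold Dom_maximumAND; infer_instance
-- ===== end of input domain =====

-- B replaces A's per-bit full recomputation of every number's cost over the whole accepted-mask
-- list and its hand-driven heap (n pushes + m pops) by an incremental per-number (cost, residual)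
-- state carried across bits plus heapq.nsmallest on the plain cost list (objective: faster).

-- ===== PORT A =====
-- Python tuple comparison (cost, idx) < (cost, idx), as heapq uses it
def pyLtPair (a b : Int × Int) : Bool := a.1 < b.1 || (a.1 == b.1 && a.2 < b.2)

def hpD : Int × Int := (0, 0)

-- CPython heapq._siftdown(heap, startpos, pos) with newitem the value conceptually sitting at pos
-- (exact: CPython shifts parents down and finally writes newitem; heap[pos] is never read)
def sdLoop (heap : List (Int × Int)) (startpos pos : Nat) (newitem : Int × Int) : List (Int × Int) :=
  if h : startpos < pos then
    let parentpos := (pos - 1) / 2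
    let parent := heap.getD parentpos hpD
    if pyLtPair newitem parent then
      sdLoop (heap.set pos parent) startpos parentpos newitem
    else heap.set pos newitem
  else heap.set pos newitem
termination_by pos
decreasing_by omega

-- the child-descending while-loop of CPython heapq._siftup
def suLoop (heap : List (Int × Int)) (pos endpos : Nat) : List (Int × Int) × Nat :=
  let childpos := 2 * pos + 1
  if h : childpos < endpos then
    let rightpos := childpos + 1
    let childpos' := if rightpos < endpos && !(pyLtPair (heap.getD childpos hpD) (heap.getD rightpos hpD)) then rightpos else childpos
    suLoop (heap.set pos (heap.getD childpos' hpD)) childpos' endpos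
  else (heap, pos)
termination_by endpos - pos
decreasing_by split <;> omega

-- CPython heapq._siftup(heap, pos)
def siftupP (heap : List (Int × Int)) (pos : Nat) : List (Int × Int) :=
  let newitem := heap.getD pos hpD
  let r := suLoop heap pos heap.length
  sdLoop r.1 pos r.2 newitem

-- heapq.heappush
def heappushP (heap : List (Int × Int)) (item : Int × Int) : List (Int × Int) :=
  sdLoop (heap ++ [item]) 0 heap.length item

-- heapq.heappop; none = IndexError on an empty heap
def heappopP (heap : List (Int × Int)) : Option ((Int × Int) × List (Int × Int)) :=
  match PySem.List.pop? heap (-1) with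
  | none => none
  | some (lastelt, rest) =>
    if rest.isEmpty then some (lastelt, rest)
    else some (rest.getD 0 hpD, siftupP (rest.set 0 lastelt) 0)

-- A's inner 'for t1 in tm' body, on state (cst, a1)
def innerStep (s : Int × Int) (t1 : Int) : Int × Int :=
  let a1 := PySem.Int.mod s.2 (t1 * 2)
  if a1 < t1 then (s.1 + (t1 - PySem.Int.mod a1 t1), (0 : Int)) else (s.1, PySem.Int.mod a1 t1)

def costOf (tm : List Int) (a : Int) : Int := (tm.foldl innerStep (0, a)).1

-- 'for _ in range(m): cost,idx = heappop(st); cand.append([cost,idx]); acc += cost'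
def popLoop : Nat → List (Int × Int) → Int → List (List Int) → Option (Int × List (Int × Int) × List (List Int))
  | 0, st, acc, cand => some (acc, st, cand)
  | t + 1, st, acc, cand =>
    match heappopP st with
    | none => none
    | some (x, st') => popLoop t st' (acc + x.1) (cand ++ [[x.1, x.2]])

-- one iteration of A's 'for l in range(32,-1,-1)' loop; none = the IndexError propagating
def aStep (nums : List Int) (k m : Int) (retO : Option (List Int)) (l : Int) : Option (List Int) :=
  match retO with
  | none => none
  | some ret =>
    let msk : Int := (1 : Int) <<< l.toNat   -- 1 << l, exact for the l ≥ 0 that range(32,-1,-1) yields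
    let tm := ret ++ [msk]
    let st := (PySem.List.enumerate nums 0).foldl (fun st p => heappushP st (costOf tm p.2, p.1)) []
    match popLoop m.toNat st 0 [] with
    | none => none
    | some (acc, _, _) => some (if acc ≤ k then ret ++ [msk] else ret)

def maximumAND (nums : List Int) (k : Int) (m : Int) : Int :=
  match (PySem.List.pyRange 32 (-1) (-1)).foldl (aStep nums k m) (some []) with
  | some ret => ret.sum
  | none => 0   -- unreachable under Pre_: Python raised IndexError here

-- ===== PORT B =====
-- Source B's per-number body: (c + msk - r, 0) if r < msk else (c, r - msk) with r = a % (msk << 1)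
def bStep (msk : Int) (p : Int × Int) : Int × Int :=
  let r := PySem.Int.mod p.2 (msk <<< (1 : Nat))
  if r < msk then (p.1 + msk - r, 0) else (p.1, r - msk)

-- one iteration of Source B's bit loop on state (total, state-list)
def bOuterStep (k m : Int) (s : Int × List (Int × Int)) (l : Int) : Int × List (Int × Int) :=
  let msk : Int := (1 : Int) <<< l.toNat
  let nxt := s.2.map (bStep msk)
  -- sum(nsmallest(m, costs)) ported as the sum of the first m of the ascending sort (exact on Int lists)
  if ((PySem.List.sorted (nxt.map (·.1)) (fun x => x) false).take m.toNat).sum ≤ k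
  then (s.1 + msk, nxt) else (s.1, s.2)

def maximumAND_alt (nums : List Int) (k : Int) (m : Int) : Int :=
  ((PySem.List.pyRange 32 (-1) (-1)).foldl (bOuterStep k m)
    (0, nums.map (fun a => ((0 : Int), a)))).1

-- ===== PRECONDITION & SPEC =====
-- A pops the n-element heap m times, so it raises IndexError exactly when m > len(nums)
def Pre_maximumAND (nums : List Int) (k : Int) (m : Int) : Prop := m ≤ (nums.length : Int)
instance (nums : List Int) (k : Int) (m : Int) : Decidable (Pre_maximumAND nums k m) := by unfold Pre_maximumAND; infer_instance

def pvWitness_maximumAND : List Int × Int × Int := ([0, 3], 1, 1)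

def Spec_maximumAND (nums : List Int) (k : Int) (m : Int) (out : Int) : Prop := out = maximumAND_alt nums k m
instance (nums : List Int) (k : Int) (m : Int) (out : Int) : Decidable (Spec_maximumAND nums k m out) := by unfold Spec_maximumAND; infer_instance

-- ===== CLAIM (what is proved, stated in full; the proofs are below) =====
def Claim_equal_maximumAND : Prop := ∀ (nums : List Int) (k : Int) (m : Int), Dom_maximumAND nums k m → Pre_maximumAND nums k m → Spec_maximumAND nums k m (maximumAND nums k m)

-- ===== LEMMAS AND PROOFS =====

-- ≤ in the heap order: 'b is not lexicographically below a'
theorem hpLe_iff (a b : Int × Int) : pyLtPair b a = false ↔ (a.1 < b.1 ∨ (a.1 = b.1 ∧ a.2 ≤ b.2)) := by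
  simp [pyLtPair]; omega

theorem hpLe_refl (a : Int × Int) : pyLtPair a a = false := by simp [hpLe_iff]

theorem hpLe_trans {a b c : Int × Int} (h1 : pyLtPair b a = false) (h2 : pyLtPair c b = false) :
    pyLtPair c a = false := by
  rw [hpLe_iff] at *; omega

theorem hpLt_le {a b : Int × Int} (h : pyLtPair a b = true) : pyLtPair b a = false := by
  simp [pyLtPair] at *; omega

-- heap-order invariant: every non-root entry is ≥ its parent
def IsHeap (h : List (Int × Int)) : Prop :=
  ∀ j, 0 < j → j < h.length → pyLtPair (h.getD j hpD) (h.getD ((j - 1) / 2) hpD) = false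

theorem isHeap_nil : IsHeap [] := by intro j _ hj; simp at hj

theorem getD_set (l : List (Int × Int)) (i j : Nat) (v : Int × Int) :
    (l.set i v).getD j hpD = if i = j ∧ i < l.length then v else l.getD j hpD := by
  simp only [List.getD, List.getElem?_set]
  by_cases hij : i = j
  · subst hij
    by_cases hl : i < l.length
    · simp [hl]
    · simp [hl]
  · simp [hij]

theorem set_getD_self (l : List (Int × Int)) (i : Nat) :
    l.set i (l.getD i hpD) = l := by
  by_cases h : i < l.length
  · simp [List.getD, List.getElem?_eq_getElem h]
  · exact List.set_eq_of_length_le (by omega)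

-- the multiset effect of one sift shift: copy entry j into slot i, then write w over slot j
theorem getD_set' (l : List (Int × Int)) (i j : Nat) (v : Int × Int) (hi : i < l.length) :
    (l.set i v).getD j hpD = if j = i then v else l.getD j hpD := by
  rw [getD_set]
  by_cases hq : j = i
  · simp [hq, hi]
  · simp [hq, show ¬ i = j from fun e => hq e.symm]

-- a :: t.set i b is, as a multiset, b :: t.set i a
theorem cons_set_swap_perm : ∀ (t : List (Int × Int)) (i : Nat) (a b : Int × Int), i < t.length →
    (a :: t.set i b).Perm (b :: t.set i a) := by
  intro t
  induction t with
  | nil => intro i a b hi; simp at hi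
  | cons y s IH =>
    intro i a b hi
    match i with
    | 0 => simpa using List.Perm.swap b a s
    | Nat.succ i' =>
      have h1 : (a :: y :: s.set i' b).Perm (y :: a :: s.set i' b) := List.Perm.swap y a _
      have h2 : (y :: a :: s.set i' b).Perm (y :: b :: s.set i' a) :=
        List.Perm.cons y (IH i' a b (by simpa using hi))
      have h3 : (y :: b :: s.set i' a).Perm (b :: y :: s.set i' a) := List.Perm.swap b y _
      simpa using (h1.trans h2).trans h3

theorem set_swap_perm (l : List (Int × Int)) (i j : Nat) (hij : j ≠ i) (hi : i < l.length)
    (hj : j < l.length) (w : Int × Int) :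
    ((l.set i (l.getD j hpD)).set j w).Perm (l.set i w) := by
  induction l generalizing i j with
  | nil => simp at hi
  | cons x t IH =>
    match i, j with
    | 0, 0 => omega
    | 0, Nat.succ j' =>
      have hb : (x :: t).getD (j' + 1) hpD = t.getD j' hpD := by simp [List.getD]
      rw [hb]
      show (t.getD j' hpD :: t.set j' w).Perm (w :: t)
      have := cons_set_swap_perm t j' (t.getD j' hpD) w (by simpa using hj)
      rw [set_getD_self] at this
      exact this
    | Nat.succ i', 0 =>
      show (w :: t.set i' ((x :: t).getD 0 hpD)).Perm (x :: t.set i' w)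
      have hb : (x :: t).getD 0 hpD = x := by simp [List.getD]
      rw [hb]
      exact cons_set_swap_perm t i' w x (by simpa using hi)
    | Nat.succ i', Nat.succ j' =>
      have hb : (x :: t).getD (j' + 1) hpD = t.getD j' hpD := by simp [List.getD]
      rw [hb]
      exact List.Perm.cons x (by
        have := IH i' j' (by omega) (by simpa using hi) (by simpa using hj)
        exact this)

-- heap except possibly the edge into the hole at pos, once newitem is placed there
def AlmostHeap (h : List (Int × Int)) (pos : Nat) (x : Int × Int) : Prop :=
  ∀ j, 0 < j → j < h.length → j ≠ pos →
    pyLtPair ((h.set pos x).getD j hpD) ((h.set pos x).getD ((j - 1) / 2) hpD) = false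

-- the hole's grandparent already dominates the hole's children
def HoleCc (h : List (Int × Int)) (pos : Nat) (x : Int × Int) : Prop :=
  0 < pos → ∀ j, j < h.length → (j - 1) / 2 = pos →
    pyLtPair ((h.set pos x).getD j hpD) ((h.set pos x).getD ((pos - 1) / 2) hpD) = false

theorem sdLoop_spec : ∀ (pos : Nat) (h : List (Int × Int)) (x : Int × Int),
    pos < h.length → AlmostHeap h pos x → HoleCc h pos x →
    IsHeap (sdLoop h 0 pos x) ∧ (sdLoop h 0 pos x).Perm (h.set pos x) := by
  intro pos
  induction pos using Nat.strong_induction_on with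
  | _ pos IH =>
    intro h x hlen ha hc
    rw [sdLoop]
    by_cases hp : 0 < pos
    · simp only [dif_pos hp]
      set pp := (pos - 1) / 2 with hppdef
      have hpplt : pp < pos := by omega
      set parent := h.getD pp hpD with hpar
      -- the two getD views used throughout
      have hf : ∀ q, (h.set pos x).getD q hpD = if q = pos then x else h.getD q hpD := fun q =>
        getD_set' h pos q x hlen
      by_cases hlt : pyLtPair x parent = true
      · simp only [if_pos hlt]
        have hg : ∀ q, ((h.set pos parent).set pp x).getD q hpD =
            if q = pp then x else if q = pos then parent else h.getD q hpD := by
          intro q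
          rw [getD_set' _ _ _ _ (by rw [List.length_set]; omega),
              getD_set' _ _ _ _ hlen]
        have hxlepar : pyLtPair parent x = false := hpLt_le hlt
        -- preconditions of the recursive call
        have ha' : AlmostHeap (h.set pos parent) pp x := by
          intro j hj hjlen hjpp
          rw [List.length_set] at hjlen
          rw [hg, hg]
          by_cases hjp : j = pos
          · simp only [if_neg (show ¬ j = pp by omega), if_pos hjp,
              if_pos (show (j - 1) / 2 = pp by omega)]
            exact hxlepar
          · have hje : (if j = pp then x else if j = pos then parent else h.getD j hpD) = h.getD j hpD := by
              simp [hjpp, hjp]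
            rw [hje]
            by_cases hpj1 : (j - 1) / 2 = pp
            · simp only [if_pos hpj1]
              -- x ≤ parent ≤ h[j]
              have h2 : pyLtPair (h.getD j hpD) parent = false := by
                have := ha j hj hjlen hjp
                rw [hf, hf, if_neg hjp, hpj1, if_neg (by omega : ¬ pp = pos)] at this
                exact this
              exact hpLe_trans hxlepar h2
            · by_cases hpj2 : (j - 1) / 2 = pos
              · simp only [if_neg hpj1, if_pos hpj2]
                have := hc hp j hjlen hpj2
                rw [hf, hf, if_neg hjp, if_neg (by omega : ¬ pp = pos)] at this
                exact this
              · simp only [if_neg hpj1, if_neg hpj2]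
                have := ha j hj hjlen hjp
                rw [hf, hf, if_neg hjp, if_neg hpj2] at this
                exact this
        have hc' : HoleCc (h.set pos parent) pp x := by
          intro hpp0 j hjlen hpjeq
          rw [List.length_set] at hjlen
          have hjgt : 2 * pp + 1 ≤ j := by omega
          have hjnpp : ¬ j = pp := by omega
          set pp2 := (pp - 1) / 2 with hpp2def
          have hpp2pp : pp2 < pp := by omega
          rw [hg, hg]
          have happ : pyLtPair (h.getD pp hpD) (h.getD pp2 hpD) = false := by
            have := ha pp hpp0 (by omega) (by omega)
            rw [hf, hf, if_neg (by omega : ¬ pp = pos), if_neg (by omega : ¬ (pp-1)/2 = pos)] at this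
            exact this
          simp only [if_neg hjnpp, if_neg (by omega : ¬ pp2 = pp), if_neg (by omega : ¬ pp2 = pos)]
          by_cases hjp : j = pos
          · simp only [if_pos hjp]
            exact happ
          · simp only [if_neg hjp]
            have h1 : pyLtPair (h.getD j hpD) (h.getD pp hpD) = false := by
              have := ha j (by omega) hjlen hjp
              rw [hf, hf, if_neg hjp, hpjeq, if_neg (by omega : ¬ pp = pos)] at this
              exact this
            exact hpLe_trans happ h1
        have hrec := IH pp hpplt (h.set pos parent) x (by rw [List.length_set]; omega) ha' hc'
        refine ⟨hrec.1, hrec.2.trans ?_⟩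
        exact set_swap_perm h pos pp (by omega) hlen (by omega) x
      · simp only [if_neg hlt]
        refine ⟨?_, List.Perm.refl _⟩
        intro j hj hjlen
        rw [List.length_set] at hjlen
        by_cases hjp : j = pos
        · rw [hf, hf, if_pos hjp, if_neg (show ¬ (j - 1)/2 = pos by omega),
              show (j - 1)/2 = (pos - 1)/2 from by omega]
          simpa using hlt
        · exact ha j hj hjlen hjp
    · simp only [dif_neg hp]
      refine ⟨?_, List.Perm.refl _⟩
      intro j hj hjlen
      rw [List.length_set] at hjlen
      exact ha j hj hjlen (by omega)

-- heap except for edges touching the hole at pos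
def SuInv1 (h : List (Int × Int)) (pos : Nat) : Prop :=
  ∀ j, 0 < j → j < h.length → j ≠ pos → (j - 1) / 2 ≠ pos →
    pyLtPair (h.getD j hpD) (h.getD ((j - 1) / 2) hpD) = false

def SuInv2 (h : List (Int × Int)) (pos : Nat) : Prop :=
  0 < pos → ∀ j, j < h.length → (j - 1) / 2 = pos →
    pyLtPair (h.getD j hpD) (h.getD ((pos - 1) / 2) hpD) = false

theorem suLoop_spec : ∀ (fuel : Nat) (h : List (Int × Int)) (pos : Nat), h.length - pos ≤ fuel →
    pos < h.length → SuInv1 h pos → SuInv2 h pos →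
    (suLoop h pos h.length).2 < h.length ∧ (suLoop h pos h.length).1.length = h.length ∧
    h.length ≤ 2 * (suLoop h pos h.length).2 + 1 ∧ SuInv1 (suLoop h pos h.length).1 (suLoop h pos h.length).2 ∧
    ∀ x, ((suLoop h pos h.length).1.set (suLoop h pos h.length).2 x).Perm (h.set pos x) := by
  intro fuel
  induction fuel with
  | zero => intro h pos hfuel hlen _ _; omega
  | succ fuel IH =>
    intro h pos hfuel hlen h1 h2
    by_cases hcp : 2 * pos + 1 < h.length
    · rw [suLoop]
      simp only [dif_pos hcp]
      set cp := (if (decide (2 * pos + 1 + 1 < h.length) && !pyLtPair (h.getD (2 * pos + 1) hpD) (h.getD (2 * pos + 1 + 1) hpD)) = true then 2 * pos + 1 + 1 else 2 * pos + 1) with hcpdef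
      have hcpfacts : cp < h.length ∧ pos < cp ∧ (cp - 1) / 2 = pos := by
        rw [hcpdef]; split
        · rename_i hb; simp only [Bool.and_eq_true, decide_eq_true_eq] at hb; omega
        · omega
      obtain ⟨hcl, hcg, hcpar⟩ := hcpfacts
      have Hmin : ∀ j, 0 < j → j < h.length → (j - 1) / 2 = pos → j ≠ cp →
          pyLtPair (h.getD j hpD) (h.getD cp hpD) = false := by
        intro j hj0 hjl hpj hjcp
        by_cases hb : (decide (2 * pos + 1 + 1 < h.length) && !pyLtPair (h.getD (2 * pos + 1) hpD) (h.getD (2 * pos + 1 + 1) hpD)) = true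
        · rw [hcpdef, if_pos hb] at hjcp ⊢
          simp only [Bool.and_eq_true, decide_eq_true_eq, Bool.not_eq_true'] at hb
          rw [show j = 2 * pos + 1 from by omega]
          exact hb.2
        · rw [hcpdef, if_neg hb] at hjcp ⊢
          have hj : j = 2 * pos + 1 + 1 := by omega
          simp only [Bool.and_eq_true, decide_eq_true_eq, Bool.not_eq_true'] at hb
          cases hB : pyLtPair (h.getD (2 * pos + 1) hpD) (h.getD (2 * pos + 1 + 1) hpD) with
          | false => exact absurd ⟨by omega, hB⟩ hb
          | true => rw [hj]; exact hpLt_le hB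
      have hgs : ∀ q, (h.set pos (h.getD cp hpD)).getD q hpD =
          if q = pos then h.getD cp hpD else h.getD q hpD := fun q => getD_set' h pos q _ hlen
      have hinv1 : SuInv1 (h.set pos (h.getD cp hpD)) cp := by
        intro j hj hjlen hjcp hpjcp
        rw [List.length_set] at hjlen
        rw [hgs, hgs]
        by_cases hjp : j = pos
        · rw [if_pos hjp, if_neg (show ¬ (j - 1) / 2 = pos by omega)]
          have := h2 (by omega) cp hcl hcpar
          rw [show (j - 1) / 2 = (pos - 1) / 2 from by omega]
          exact this
        · by_cases hpj : (j - 1) / 2 = pos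
          · rw [if_neg hjp, if_pos hpj]
            exact Hmin j hj hjlen hpj hjcp
          · rw [if_neg hjp, if_neg hpj]
            exact h1 j hj hjlen hjp hpj
      have hinv2 : SuInv2 (h.set pos (h.getD cp hpD)) cp := by
        intro hcp0 j hjlen hpjeq
        rw [List.length_set] at hjlen
        rw [hgs, hgs]
        rw [if_neg (show ¬ j = pos by omega), if_pos (show (cp - 1) / 2 = pos from hcpar)]
        rw [← hpjeq]
        exact h1 j (by omega) hjlen (by omega) (by omega)
      have hlh' : (h.set pos (h.getD cp hpD)).length = h.length := by simp
      have IHres := IH (h.set pos (h.getD cp hpD)) cp (by rw [hlh']; omega) (by rw [hlh']; omega) hinv1 hinv2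
      rw [hlh'] at IHres
      obtain ⟨c1, c2, c3, c4, c5⟩ := IHres
      exact ⟨c1, c2, c3, c4, fun x => (c5 x).trans (set_swap_perm h pos cp (by omega) hlen hcl x)⟩
    · rw [suLoop]
      simp only [dif_neg hcp]
      exact ⟨hlen, by simp, by omega, h1, fun x => List.Perm.refl _⟩

theorem siftupP_spec (h : List (Int × Int)) (hne : 0 < h.length)
    (h1 : SuInv1 h 0) : IsHeap (siftupP h 0) ∧ (siftupP h 0).Perm h := by
  have h2 : SuInv2 h 0 := by intro h0; omega
  obtain ⟨c1, c2, c3, c4, c5⟩ := suLoop_spec h.length h 0 (by omega) hne h1 h2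
  unfold siftupP
  have hnoch : ∀ j, ¬ (0 < j ∧ j < (suLoop h 0 h.length).1.length ∧ (j - 1) / 2 = (suLoop h 0 h.length).2) := by
    intro j ⟨hj0, hjl, hpj⟩
    rw [c2] at hjl; omega
  have ha : AlmostHeap (suLoop h 0 h.length).1 (suLoop h 0 h.length).2 (h.getD 0 hpD) := by
    intro j hj hjlen hjp
    rw [getD_set' _ _ _ _ (by rw [c2]; omega), getD_set' _ _ _ _ (by rw [c2]; omega)]
    rw [if_neg hjp, if_neg (show ¬ (j - 1) / 2 = (suLoop h 0 h.length).2 from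
      fun e => hnoch j ⟨hj, hjlen, e⟩)]
    exact c4 j hj hjlen hjp (fun e => hnoch j ⟨hj, hjlen, e⟩)
  have hc : HoleCc (suLoop h 0 h.length).1 (suLoop h 0 h.length).2 (h.getD 0 hpD) := by
    intro hp j hjlen hpj
    exact absurd ⟨by omega, hjlen, hpj⟩ (hnoch j)
  obtain ⟨d1, d2⟩ := sdLoop_spec (suLoop h 0 h.length).2 (suLoop h 0 h.length).1 (h.getD 0 hpD)
    (by rw [c2]; omega) ha hc
  refine ⟨d1, d2.trans ?_⟩
  have := c5 (h.getD 0 hpD)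
  rw [set_getD_self] at this
  exact this

theorem heappushP_spec (h : List (Int × Int)) (x : Int × Int) (hh : IsHeap h) :
    IsHeap (heappushP h x) ∧ (heappushP h x).Perm (h ++ [x]) := by
  unfold heappushP
  have hlen : h.length < (h ++ [x]).length := by simp
  have hgn : (h ++ [x]).getD h.length hpD = x := by
    simp [List.getD]
  have hsetn : (h ++ [x]).set h.length x = h ++ [x] := by
    have := set_getD_self (h ++ [x]) h.length
    rwa [hgn] at this
  have hgl : ∀ q, q < h.length → (h ++ [x]).getD q hpD = h.getD q hpD := by
    intro q hq; simp [List.getD, List.getElem?_append_left hq]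
  have ha : AlmostHeap (h ++ [x]) h.length x := by
    intro j hj hjlen hjn
    rw [hsetn]
    have hjl : j < h.length := by simp at hjlen; omega
    rw [hgl j hjl, hgl _ (by omega)]
    exact hh j hj hjl
  have hc : HoleCc (h ++ [x]) h.length x := by
    intro hn j hjlen hpj
    simp at hjlen; omega
  obtain ⟨d1, d2⟩ := sdLoop_spec h.length (h ++ [x]) x hlen ha hc
  rw [hsetn] at d2
  exact ⟨d1, d2⟩

theorem heappopP_spec (h : List (Int × Int)) (hh : IsHeap h) (hne : h ≠ []) :
    ∃ h', heappopP h = some (h.getD 0 hpD, h') ∧ IsHeap h' ∧ h'.Perm h.tail := by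
  obtain ⟨hd, t, rfl⟩ := List.exists_cons_of_ne_nil hne
  rcases List.eq_nil_or_concat t with rfl | ⟨t', z, rfl⟩
  · refine ⟨[], ?_, isHeap_nil, by simp⟩
    unfold heappopP
    rw [show (hd :: ([] : List (Int × Int))) = [] ++ [hd] from rfl, PySem.List.pop?_last]
    simp [List.getD]
  · simp only [List.concat_eq_append] at hh ⊢
    unfold heappopP
    rw [show hd :: (t' ++ [z]) = (hd :: t') ++ [z] from rfl, PySem.List.pop?_last]
    have hg2 : ∀ q, 0 < q → q < t'.length + 1 →
        (z :: t').getD q hpD = (hd :: (t' ++ [z])).getD q hpD := by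
      intro q h0 hq
      match q, h0 with
      | q' + 1, _ =>
        simp only [List.getD, List.getElem?_cons_succ]
        rw [List.getElem?_append_left (by omega)]
    have hsu1 : SuInv1 ((hd :: t').set 0 z) 0 := by
      intro j hj hjlen hj0 hpj0
      rw [show (hd :: t').set 0 z = z :: t' from rfl] at hjlen ⊢
      simp only [List.length_cons] at hjlen
      rw [hg2 j hj hjlen, hg2 _ (by omega) (by omega)]
      exact hh j hj (by simp; omega)
    obtain ⟨p1, p2⟩ := siftupP_spec ((hd :: t').set 0 z) (by simp) hsu1
    refine ⟨siftupP ((hd :: t').set 0 z) 0, ?_, p1, ?_⟩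
    · simp [List.getD]
    · show (siftupP ((hd :: t').set 0 z) 0).Perm (t' ++ [z])
      rw [show (hd :: t').set 0 z = z :: t' from rfl] at p2
      exact p2.trans (List.perm_append_singleton z t').symm

theorem heap_head_le (h : List (Int × Int)) (hh : IsHeap h) :
    ∀ j, j < h.length → pyLtPair (h.getD j hpD) (h.getD 0 hpD) = false := by
  intro j
  induction j using Nat.strong_induction_on with
  | _ j IH =>
    intro hj
    match j, hj with
    | 0, _ => exact hpLe_refl _
    | Nat.succ j', hj =>
      have h1 := hh (j' + 1) (by omega) hj
      have h2 := IH ((j' + 1 - 1) / 2) (by omega) (by omega)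
      exact hpLe_trans h2 h1

theorem pushAll_gen : ∀ (ps h0 : List (Int × Int)), IsHeap h0 →
    IsHeap (ps.foldl heappushP h0) ∧ (ps.foldl heappushP h0).Perm (h0 ++ ps) := by
  intro ps
  induction ps with
  | nil => intro h0 hh; exact ⟨hh, by simp⟩
  | cons x t IHt =>
    intro h0 hh
    obtain ⟨p1, p2⟩ := heappushP_spec h0 x hh
    obtain ⟨q1, q2⟩ := IHt (heappushP h0 x) p1
    refine ⟨q1, q2.trans ?_⟩
    calc (heappushP h0 x ++ t).Perm ((h0 ++ [x]) ++ t) := p2.append_right t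
      _ = h0 ++ x :: t := by simp

theorem pushAll_spec (ps : List (Int × Int)) :
    IsHeap (ps.foldl heappushP []) ∧ (ps.foldl heappushP []).Perm ps := by
  simpa using pushAll_gen ps [] isHeap_nil

-- the heap minimum, as a membership fact
theorem heap_head_le_mem (h : List (Int × Int)) (hh : IsHeap h) (p : Int × Int) (hp : p ∈ h) :
    pyLtPair p (h.getD 0 hpD) = false := by
  obtain ⟨j, hj, rfl⟩ := List.mem_iff_getElem.1 hp
  have := heap_head_le h hh j hj
  rwa [List.getD_eq_getElem h hpD hj] at this

-- sorting a list whose head is a lower bound of the tail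
theorem sorted_cons_of_min (c : Int) (cs : List Int) (hmin : ∀ y ∈ cs, c ≤ y) :
    PySem.List.sorted (c :: cs) (fun x => x) false =
      c :: PySem.List.sorted cs (fun x => x) false := by
  apply PySem.List.sorted_id_eq_of_perm_of_pairwise
  · exact List.Perm.cons c (PySem.List.sorted_perm cs (fun x => x) false)
  · rw [List.pairwise_cons]
    exact ⟨fun y hy => hmin y ((PySem.List.mem_sorted cs _ _ y).1 hy),
      PySem.List.sorted_pairwise cs (fun x => x)⟩

theorem popLoop_spec : ∀ (t : Nat) (h : List (Int × Int)) (acc : Int) (cand : List (List Int)),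
    IsHeap h → t ≤ h.length →
    ∃ st' cand', popLoop t h acc cand =
      some (acc + ((PySem.List.sorted (h.map Prod.fst) (fun x => x) false).take t).sum, st', cand') := by
  intro t
  induction t with
  | zero => intro h acc cand _ _; exact ⟨h, cand, by simp [popLoop]⟩
  | succ t IHt =>
    intro h acc cand hh hle
    have hne : h ≠ [] := by intro e; rw [e] at hle; simp at hle
    obtain ⟨h', hpop, hh', hperm⟩ := heappopP_spec h hh hne
    have hmin : ∀ y ∈ h.map Prod.fst, (h.getD 0 hpD).1 ≤ y := by
      intro y hy
      obtain ⟨p, hpm, rfl⟩ := List.mem_map.1 hy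
      have := heap_head_le_mem h hh p hpm
      rw [hpLe_iff] at this
      omega
    obtain ⟨hd, tl, rfl⟩ := List.exists_cons_of_ne_nil hne
    have hd0 : (hd :: tl).getD 0 hpD = hd := by simp [List.getD]
    rw [hd0] at hpop hmin
    have hsortc : PySem.List.sorted ((hd :: tl).map Prod.fst) (fun x => x) false =
        hd.1 :: PySem.List.sorted (tl.map Prod.fst) (fun x => x) false := by
      rw [List.map_cons]
      exact sorted_cons_of_min hd.1 (tl.map Prod.fst) (by simpa [List.map_cons] using hmin)
    have hsort' : PySem.List.sorted (h'.map Prod.fst) (fun x => x) false =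
        PySem.List.sorted (tl.map Prod.fst) (fun x => x) false :=
      PySem.List.sorted_eq_sorted_of_perm _ _ _ (fun a b e => e) (hperm.map Prod.fst)
    obtain ⟨st', cand', hrec⟩ := IHt h' (acc + hd.1) (cand ++ [[hd.1, hd.2]]) hh'
      (by have hl2 := hperm.length_eq; simp only [List.tail_cons] at hl2
          simp only [List.length_cons] at hle; omega)
    refine ⟨st', cand', ?_⟩
    show (match heappopP (hd :: tl) with
      | none => none
      | some (x, st') => popLoop t st' (acc + x.1) (cand ++ [[x.1, x.2]])) = _
    rw [hpop]
    show popLoop t h' (acc + hd.1) (cand ++ [[hd.1, hd.2]]) = _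
    rw [hrec, hsortc, hsort']
    congr 1
    congr 1
    rw [List.take_succ_cons, List.sum_cons]
    ring

theorem aStep_eq (nums : List Int) (k m : Int) (ret : List Int) (l : Int)
    (hm : m.toNat ≤ nums.length) :
    aStep nums k m (some ret) l =
      some (if ((PySem.List.sorted (nums.map (costOf (ret ++ [(1 : Int) <<< l.toNat]))) (fun x => x) false).take m.toNat).sum ≤ k
            then ret ++ [(1 : Int) <<< l.toNat] else ret) := by
  set msk : Int := (1 : Int) <<< l.toNat with hmskdef
  set tm := ret ++ [msk] with htmdef
  set st := (PySem.List.enumerate nums 0).foldl (fun st p => heappushP st (costOf tm p.2, p.1)) [] with hstdef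
  have hst2 : st = ((PySem.List.enumerate nums 0).map (fun p => (costOf tm p.2, p.1))).foldl heappushP [] := by
    rw [hstdef, List.foldl_map]
  obtain ⟨hheap, hperm⟩ := pushAll_spec ((PySem.List.enumerate nums 0).map (fun p => (costOf tm p.2, p.1)))
  rw [← hst2] at hheap hperm
  have hlenst : st.length = nums.length := by
    rw [hperm.length_eq]; simp [PySem.List.length_enumerate]
  have hcosts : (st.map Prod.fst).Perm (nums.map (costOf tm)) := by
    refine (hperm.map Prod.fst).trans ?_
    rw [List.map_map]
    have : (Prod.fst ∘ fun p : Int × Int => (costOf tm p.2, p.1)) = (fun p : Int × Int => costOf tm p.2) := rfl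
    rw [this]
    have : (fun p : Int × Int => costOf tm p.2) = (costOf tm ∘ fun p : Int × Int => p.2) := rfl
    rw [this, ← List.map_map, PySem.List.map_snd_enumerate]
  have hsorteq : PySem.List.sorted (st.map Prod.fst) (fun x => x) false =
      PySem.List.sorted (nums.map (costOf tm)) (fun x => x) false :=
    PySem.List.sorted_eq_sorted_of_perm _ _ _ (fun a b e => e) hcosts
  obtain ⟨st', cand', hpl⟩ := popLoop_spec m.toNat st 0 [] hheap (by omega)
  rw [show aStep nums k m (some ret) l = (match popLoop m.toNat st 0 [] with
      | none => none
      | some (acc, _, _) => some (if acc ≤ k then tm else ret)) from rfl,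
    hpl, hsorteq]
  simp

theorem step_agree (msk : Int) (hm : 0 < msk) (p : Int × Int) : bStep msk p = innerStep p msk := by
  show (if PySem.Int.mod p.2 (msk <<< (1 : Nat)) < msk
        then ((p.1 + msk - PySem.Int.mod p.2 (msk <<< (1 : Nat)) : Int), (0 : Int))
        else (p.1, (PySem.Int.mod p.2 (msk <<< (1 : Nat)) - msk : Int))) =
       (if PySem.Int.mod p.2 (msk * 2) < msk
        then ((p.1 + (msk - PySem.Int.mod (PySem.Int.mod p.2 (msk * 2)) msk) : Int), (0 : Int))
        else (p.1, PySem.Int.mod (PySem.Int.mod p.2 (msk * 2)) msk))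
  have hshift : msk <<< (1 : Nat) = msk * 2 := by
    rw [Int.shiftLeft_eq]; ring
  rw [hshift]
  set r := PySem.Int.mod p.2 (msk * 2) with hrdef
  have hr0 : 0 ≤ r := PySem.Int.mod_nonneg _ (by omega)
  have hr2 : r < msk * 2 := PySem.Int.mod_lt _ (by omega)
  by_cases hlt : r < msk
  · rw [if_pos hlt, if_pos hlt]
    have : PySem.Int.mod r msk = r := by
      rw [PySem.Int.mod_eq_emod_of_pos (show (0:Int) < msk by omega), Int.emod_eq_of_lt hr0 hlt]
    rw [this, show p.1 + msk - r = p.1 + (msk - r) by ring]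
  · rw [if_neg hlt, if_neg hlt]
    have : PySem.Int.mod r msk = r - msk := by
      rw [PySem.Int.mod_eq_emod_of_pos (show (0:Int) < msk by omega), ← Int.sub_emod_right r msk,
        Int.emod_eq_of_lt (by omega) (by omega)]
    rw [this]

theorem outer_loop_eq (nums : List Int) (k m : Int) (hm : m.toNat ≤ nums.length) :
    ∀ (L : List Int) (ret : List Int),
    ∃ ret', L.foldl (aStep nums k m) (some ret) = some ret' ∧
      L.foldl (bOuterStep k m) (ret.sum, nums.map (fun a => ret.foldl innerStep (0, a))) =
        (ret'.sum, nums.map (fun a => ret'.foldl innerStep (0, a))) := by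
  intro L
  induction L with
  | nil => intro ret; exact ⟨ret, rfl, rfl⟩
  | cons l L IHL =>
    intro ret
    set msk : Int := (1 : Int) <<< l.toNat with hmskdef
    have hmsk : 0 < msk := by
      rw [hmskdef, Int.shiftLeft_eq]; positivity
    have hmap : (nums.map (fun a => ret.foldl innerStep (0, a))).map (bStep msk) =
        nums.map (fun a => (ret ++ [msk]).foldl innerStep (0, a)) := by
      rw [List.map_map]
      apply List.map_congr_left
      intro a _
      show bStep msk (ret.foldl innerStep (0, a)) = _
      rw [step_agree msk hmsk, List.foldl_append]
      rfl
    have hcost : (nums.map (fun a => (ret ++ [msk]).foldl innerStep (0, a))).map (fun x => x.1) =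
        nums.map (costOf (ret ++ [msk])) := by
      rw [List.map_map]; rfl
    have hbstep : bOuterStep k m (ret.sum, nums.map (fun a => ret.foldl innerStep (0, a))) l =
        (if ((PySem.List.sorted (nums.map (costOf (ret ++ [msk]))) (fun x => x) false).take m.toNat).sum ≤ k
         then ((ret ++ [msk]).sum, nums.map (fun a => (ret ++ [msk]).foldl innerStep (0, a)))
         else (ret.sum, nums.map (fun a => ret.foldl innerStep (0, a)))) := by
      show (if ((PySem.List.sorted (((nums.map (fun a => ret.foldl innerStep (0, a))).map (bStep msk)).map (fun x => x.1)) (fun x => x) false).take m.toNat).sum ≤ k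
            then (ret.sum + msk, (nums.map (fun a => ret.foldl innerStep (0, a))).map (bStep msk))
            else (ret.sum, nums.map (fun a => ret.foldl innerStep (0, a)))) = _
      rw [hmap, hcost]
      by_cases hc : ((PySem.List.sorted (nums.map (costOf (ret ++ [msk]))) (fun x => x) false).take m.toNat).sum ≤ k
      · rw [if_pos hc, if_pos hc]
        simp
      · rw [if_neg hc, if_neg hc]
    rw [List.foldl_cons, List.foldl_cons, aStep_eq nums k m ret l hm, hbstep, ← hmskdef]
    by_cases hc : ((PySem.List.sorted (nums.map (costOf (ret ++ [msk]))) (fun x => x) false).take m.toNat).sum ≤ k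
    · rw [if_pos hc, if_pos hc]
      exact IHL (ret ++ [msk])
    · rw [if_neg hc, if_neg hc]
      exact IHL ret

-- ===== VERDICT (by name: the statement is the Claim_ definition above) =====
theorem maximumAND_spec : Claim_equal_maximumAND := by
  intro nums k m _ hpre
  unfold Spec_maximumAND maximumAND maximumAND_alt
  have hm : m.toNat ≤ nums.length := Int.toNat_le.2 hpre
  obtain ⟨ret', hA, hB⟩ := outer_loop_eq nums k m hm (PySem.List.pyRange 32 (-1) (-1)) []
  simp only [List.sum_nil, List.foldl_nil] at hA hB
  rw [hA, hB]
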